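-- pv_equiv track=rewrite | github.com/evren2k2/agent-configs | bin/vault.py | _resolve_link
-- ===== SOURCE A (Python) =====
-- def _resolve_link(stem: str, folder_hint: str | None, source_folder: str,
--                   stem_to_keys: dict[str, list[str]]) -> str:
--     """Map a raw wikilink (stem, folder_hint) to a canonical key."""
--     candidates = stem_to_keys.get(stem, [])
--     if not candidates:
--         # Unresolved (broken link or note doesn't exist). Keep raw stem.
--         return stem
--     if len(candidates) == 1:
--         return candidates[0]
--     # Disambiguate
--     if folder_hint:
--         for c in candidates:
--             if "/" in c and c.split("/", 1)[0] == folder_hint: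
--                 return c
--     if source_folder:
--         for c in candidates:
--             if "/" in c and c.split("/", 1)[0] == source_folder:
--                 return c
--     return candidates[0]
-- ===== SOURCE B (Python) =====
-- def _resolve_link(stem: str, folder_hint: str | None, source_folder: str,
--                   stem_to_keys: dict[str, list[str]]) -> str:
--     """Map a raw wikilink (stem, folder_hint) to a canonical key.
--
--     Selection by ranking: every candidate gets a priority (0 = matches the
--     folder hint, 1 = matches the source folder, 2 = no match) and the first
--     candidate with the best priority wins (min is stable), so the staged
--     scans and early returns of the original disappear.
--     """
--     candidates = stem_to_keys.get(stem, [])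
--     if not candidates:
--         return stem
--
--     def rank(c: str) -> int:
--         if "/" in c:
--             prefix = c.split("/", 1)[0]
--             if folder_hint and prefix == folder_hint:
--                 return 0
--             if source_folder and prefix == source_folder:
--                 return 1
--         return 2
--
--     return min(candidates, key=rank)
-- ===== Notes on version B (the rewrite author's own statement) =====
-- stated objective: simpler
-- what changed: Replaced A's staged scans with early returns (hint scan, then source-folder scan, then fallback) by a single stable min over the candidates under a 0/1/2 priority key, which also subsumes the single-candidate early return.
import Mathlib
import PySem

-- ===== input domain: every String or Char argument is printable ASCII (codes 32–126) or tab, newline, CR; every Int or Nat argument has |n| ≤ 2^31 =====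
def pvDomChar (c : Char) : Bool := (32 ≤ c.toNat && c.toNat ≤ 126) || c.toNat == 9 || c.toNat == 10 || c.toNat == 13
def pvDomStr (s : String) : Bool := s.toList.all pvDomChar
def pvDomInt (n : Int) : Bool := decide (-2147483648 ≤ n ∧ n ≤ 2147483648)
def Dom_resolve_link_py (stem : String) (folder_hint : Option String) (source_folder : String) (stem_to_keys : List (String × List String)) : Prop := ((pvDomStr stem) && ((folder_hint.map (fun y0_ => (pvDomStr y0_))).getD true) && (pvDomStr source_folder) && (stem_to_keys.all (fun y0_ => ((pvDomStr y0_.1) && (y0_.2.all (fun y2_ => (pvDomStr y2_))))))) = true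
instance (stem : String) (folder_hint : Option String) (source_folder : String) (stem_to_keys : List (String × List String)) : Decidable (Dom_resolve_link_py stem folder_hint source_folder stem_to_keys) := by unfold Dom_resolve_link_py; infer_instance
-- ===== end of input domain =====

-- B replaces A's staged scans with early returns by one stable min over the candidates
-- under a 0/1/2 priority key (simpler decomposition; same cost).


-- ===== PORT A =====
-- c.split("/", 1)[0]  ("/" in c is guaranteed at every use site, so the list is nonempty)
def pvPrefix (c : String) : String :=
  (((PySem.Str.splitMax? c "/" 1).getD []).headD "")

-- the body of A's 'for c in candidates: if "/" in c and c.split("/",1)[0] == f: return c'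
def pvScan (f : String) : List String → Option String
  | [] => none
  | c :: cs => if PySem.Str.isIn "/" c = true ∧ pvPrefix c = f then some c else pvScan f cs

-- A's guarded first scan: 'if folder_hint: for c in candidates: …' (none when the hint is falsy or nothing matches)
def pvHintScan (folder_hint : Option String) (cs : List String) : Option String :=
  match folder_hint with
  | some f => if f ≠ "" then pvScan f cs else none
  | none => none

def resolve_link_py (stem : String) (folder_hint : Option String) (source_folder : String) (stem_to_keys : List (String × List String)) : String :=
  let candidates := ((PySem.Dict.ofList stem_to_keys).get? stem).getD []
  if candidates = [] then stem
  else if candidates.length = 1 then candidates.headD ""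
  else
    -- if folder_hint: scan
    match pvHintScan folder_hint candidates with
    | some c => c
    | none =>
      -- if source_folder: scan
      match (if source_folder ≠ "" then pvScan source_folder candidates else none) with
      | some c => c
      | none => candidates.headD ""

-- ===== PORT B =====
-- B's rank(c): 0 = matches the (truthy) folder hint, 1 = matches the (truthy) source folder, 2 = neither
def pvRank (folder_hint : Option String) (source_folder : String) (c : String) : Int :=
  if PySem.Str.isIn "/" c = true then
    match folder_hint with
    | some f =>
      if f ≠ "" ∧ pvPrefix c = f then 0
      else if source_folder ≠ "" ∧ pvPrefix c = source_folder then 1 else 2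
    | none => if source_folder ≠ "" ∧ pvPrefix c = source_folder then 1 else 2
  else 2

def resolve_link_py_alt (stem : String) (folder_hint : Option String) (source_folder : String) (stem_to_keys : List (String × List String)) : String :=
  let candidates := ((PySem.Dict.ofList stem_to_keys).get? stem).getD []
  if candidates = [] then stem
  else (PySem.List.min? candidates (pvRank folder_hint source_folder)).getD ""

-- ===== PRECONDITION & SPEC =====
def Spec_resolve_link_py (stem : String) (folder_hint : Option String) (source_folder : String) (stem_to_keys : List (String × List String)) (out : String) : Prop := out = resolve_link_py_alt stem folder_hint source_folder stem_to_keys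
instance (stem : String) (folder_hint : Option String) (source_folder : String) (stem_to_keys : List (String × List String)) (out : String) : Decidable (Spec_resolve_link_py stem folder_hint source_folder stem_to_keys out) := by unfold Spec_resolve_link_py; infer_instance

-- ===== CLAIM (what is proved, stated in full; the proofs are below) =====
def Claim_equal_resolve_link_py : Prop := ∀ (stem : String) (folder_hint : Option String) (source_folder : String) (stem_to_keys : List (String × List String)), Dom_resolve_link_py stem folder_hint source_folder stem_to_keys → Spec_resolve_link_py stem folder_hint source_folder stem_to_keys (resolve_link_py stem folder_hint source_folder stem_to_keys)

-- ===== LEMMAS AND PROOFS =====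

-- the accumulator update of Python's min (keep the earlier element on ties)
def pvStep (r : String → Int) (acc : Option String) (c : String) : Option String :=
  match acc with
  | none => some c
  | some m => if r c < r m then some c else some m

lemma min?_eq_foldl_step (r : String → Int) (xs : List String) :
    PySem.List.min? xs r = xs.foldl (pvStep r) none := by
  unfold PySem.List.min? pvStep
  congr 1
  funext acc c
  cases acc <;> rfl

-- the rank function only takes the values 0, 1, 2
lemma pvRank_cases (fh : Option String) (sf c : String) :
    pvRank fh sf c = 0 ∨ pvRank fh sf c = 1 ∨ pvRank fh sf c = 2 := by
  unfold pvRank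
  by_cases hin : PySem.Str.isIn "/" c = true
  · rw [if_pos hin]
    rcases fh with _ | f
    · show (if sf ≠ "" ∧ pvPrefix c = sf then (1 : Int) else 2) = 0 ∨
        (if sf ≠ "" ∧ pvPrefix c = sf then (1 : Int) else 2) = 1 ∨
        (if sf ≠ "" ∧ pvPrefix c = sf then (1 : Int) else 2) = 2
      by_cases hB : sf ≠ "" ∧ pvPrefix c = sf
      · rw [if_pos hB]
        simp
      · rw [if_neg hB]
        simp
    · show (if f ≠ "" ∧ pvPrefix c = f then (0 : Int)
            else if sf ≠ "" ∧ pvPrefix c = sf then 1 else 2) = 0 ∨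
        (if f ≠ "" ∧ pvPrefix c = f then (0 : Int)
            else if sf ≠ "" ∧ pvPrefix c = sf then 1 else 2) = 1 ∨
        (if f ≠ "" ∧ pvPrefix c = f then (0 : Int)
            else if sf ≠ "" ∧ pvPrefix c = sf then 1 else 2) = 2
      by_cases hA : f ≠ "" ∧ pvPrefix c = f
      · rw [if_pos hA]
        simp
      · rw [if_neg hA]
        by_cases hB : sf ≠ "" ∧ pvPrefix c = sf
        · rw [if_pos hB]
          simp
        · rw [if_neg hB]
          simp
  · rw [if_neg hin]
    simp

-- the running strict-min fold characterized by the two first-match searches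
lemma minfold_char (r : String → Int) (hr : ∀ c, r c = 0 ∨ r c = 1 ∨ r c = 2)
    (cs : List String) (m : String) :
    cs.foldl (pvStep r) (some m)
      = some (if r m = 0 then m
              else match cs.find? (fun c => r c == 0) with
                | some c => c
                | none =>
                  if r m = 1 then m
                  else match cs.find? (fun c => r c == 1) with
                    | some c => c
                    | none => m) := by
  induction cs generalizing m with
  | nil =>
    simp only [List.foldl_nil, List.find?_nil]
    rcases hr m with h | h | h <;> simp [h]
  | cons c cs ih =>
    simp only [List.foldl_cons, List.find?_cons, pvStep]
    rcases hr m with hm | hm | hm <;> rcases hr c with hc | hc | hc <;>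
      rw [show (if r c < r m then some c else some m)
            = some (if r c < r m then c else m) by split <;> rfl] <;>
      simp [hm, hc, ih]

-- Python's min(cs, key=r) on a nonempty list
lemma min?_char (r : String → Int) (hr : ∀ c, r c = 0 ∨ r c = 1 ∨ r c = 2)
    (c0 : String) (rest : List String) :
    PySem.List.min? (c0 :: rest) r
      = some (match (c0 :: rest).find? (fun c => r c == 0) with
              | some c => c
              | none => match (c0 :: rest).find? (fun c => r c == 1) with
                | some c => c
                | none => c0) := by
  rw [min?_eq_foldl_step, List.foldl_cons, show pvStep r none c0 = some c0 from rfl,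
    minfold_char r hr rest c0]
  simp only [List.find?_cons]
  rcases hr c0 with h | h | h <;> simp [h]

-- A's folder-hint scan is the first-rank-0 search (hint truthy)
lemma scan_eq_find0 (f sf : String) (hf : f ≠ "") (cs : List String) :
    pvScan f cs = cs.find? (fun c => pvRank (some f) sf c == 0) := by
  induction cs with
  | nil => rfl
  | cons c cs ih =>
    by_cases h : PySem.Str.isIn "/" c = true ∧ pvPrefix c = f
    · have hb : pvRank (some f) sf c = 0 := by
        unfold pvRank
        rw [if_pos h.1]
        simp [hf, h.2]
      rw [List.find?_cons_of_pos (by simp [hb])]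
      simp only [pvScan]
      rw [if_pos h]
    · have hb : pvRank (some f) sf c ≠ 0 := by
        unfold pvRank
        split_ifs <;> simp_all
      rw [List.find?_cons_of_neg (by simp [hb])]
      simp only [pvScan]
      rw [if_neg h, ih]

-- when the folder hint is falsy, no candidate has rank 0
lemma rank_ne_zero_of_falsy (fh : Option String) (sf c : String)
    (h : fh = none ∨ fh = some "") : pvRank fh sf c ≠ 0 := by
  rcases h with h | h <;> subst h <;> unfold pvRank <;> split_ifs <;> simp_all

-- A's source-folder scan is the first-rank-1 search, once no candidate has rank 0 (sf truthy)
lemma scan_eq_find1 (fh : Option String) (sf : String) (hsf : sf ≠ "") (cs : List String)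
    (h0 : ∀ c ∈ cs, pvRank fh sf c ≠ 0) :
    pvScan sf cs = cs.find? (fun c => pvRank fh sf c == 1) := by
  induction cs with
  | nil => rfl
  | cons c cs ih =>
    have hc0 : pvRank fh sf c ≠ 0 := h0 c (List.mem_cons_self ..)
    by_cases h : PySem.Str.isIn "/" c = true ∧ pvPrefix c = sf
    · have hb : pvRank fh sf c = 1 := by
        unfold pvRank at hc0 ⊢
        rw [if_pos h.1] at hc0 ⊢
        cases fh with
        | none => simp [hsf, h.2]
        | some f => split_ifs at hc0 ⊢ <;> simp_all
      rw [List.find?_cons_of_pos (by simp [hb])]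
      simp only [pvScan]
      rw [if_pos h]
    · have hb : pvRank fh sf c ≠ 1 := by
        unfold pvRank
        by_cases hin : PySem.Str.isIn "/" c = true
        · rw [if_pos hin]
          have hps : ¬ pvPrefix c = sf := fun hp => h ⟨hin, hp⟩
          rcases fh with _ | f
          · simp [hps]
          · show (if f ≠ "" ∧ pvPrefix c = f then (0 : Int)
                  else if sf ≠ "" ∧ pvPrefix c = sf then 1 else 2) ≠ 1
            by_cases hA : f ≠ "" ∧ pvPrefix c = f
            · rw [if_pos hA]
              simp
            · rw [if_neg hA, if_neg (fun hB : sf ≠ "" ∧ pvPrefix c = sf => hps hB.2)]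
              simp
        · rw [if_neg hin]
          simp
      rw [List.find?_cons_of_neg (by simp [hb])]
      simp only [pvScan]
      rw [if_neg h, ih (fun c hc => h0 c (List.mem_cons_of_mem _ hc))]

-- when the source folder is falsy, no candidate has rank 1
lemma rank_ne_one_of_sf_empty (fh : Option String) (c : String) :
    pvRank fh "" c ≠ 1 := by
  unfold pvRank
  by_cases hin : PySem.Str.isIn "/" c = true
  · rw [if_pos hin]
    rcases fh with _ | f
    · show (if ("" : String) ≠ "" ∧ pvPrefix c = "" then (1 : Int) else 2) ≠ 1
      rw [if_neg (fun hB : ("" : String) ≠ "" ∧ pvPrefix c = "" => hB.1 rfl)]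
      simp
    · show (if f ≠ "" ∧ pvPrefix c = f then (0 : Int)
            else if ("" : String) ≠ "" ∧ pvPrefix c = "" then 1 else 2) ≠ 1
      by_cases hA : f ≠ "" ∧ pvPrefix c = f
      · rw [if_pos hA]
        simp
      · rw [if_neg hA, if_neg (fun hB : ("" : String) ≠ "" ∧ pvPrefix c = "" => hB.1 rfl)]
        simp
  · rw [if_neg hin]
    simp

-- A's guarded folder-hint scan is the first-rank-0 search, for any hint
lemma hint_scan_eq_find0 (fh : Option String) (sf : String) (cs : List String) :
    pvHintScan fh cs = cs.find? (fun c => pvRank fh sf c == 0) := by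
  unfold pvHintScan
  rcases fh with _ | f
  · exact (List.find?_eq_none.mpr (fun c _ => by
      simpa using rank_ne_zero_of_falsy none sf c (Or.inl rfl))).symm
  · show (if f ≠ "" then pvScan f cs else none) = _
    by_cases hf : f = ""
    · subst hf
      rw [if_neg (by simp)]
      exact (List.find?_eq_none.mpr (fun c _ => by
        simpa using rank_ne_zero_of_falsy (some "") sf c (Or.inr rfl))).symm
    · rw [if_pos hf, scan_eq_find0 f sf hf]

-- A's disambiguation on a nonempty candidate list equals B's ranked min
lemma resolve_core (fh : Option String) (sf c0 : String) (rest : List String) (s0 : Option String)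
    (h0eq : s0 = (c0 :: rest).find? (fun c => pvRank fh sf c == 0)) :
    (if (c0 :: rest).length = 1 then (c0 :: rest).headD ""
     else s0.getD ((if sf ≠ "" then pvScan sf (c0 :: rest) else none).getD ((c0 :: rest).headD "")))
      = (PySem.List.min? (c0 :: rest) (pvRank fh sf)).getD "" := by
  subst h0eq
  rw [min?_char (pvRank fh sf) (fun c => pvRank_cases fh sf c) c0 rest]
  by_cases hone : (c0 :: rest).length = 1
  · have hrest : rest = [] := by
      cases rest with
      | nil => rfl
      | cons _ _ => simp at hone
    subst hrest
    rw [if_pos hone]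
    rcases pvRank_cases fh sf c0 with h | h | h <;> simp [List.find?, h]
  · rw [if_neg hone]
    cases hfd : (c0 :: rest).find? (fun c => pvRank fh sf c == 0) with
    | some c => simp
    | none =>
      rw [Option.getD_none]
      have h0 : ∀ c ∈ (c0 :: rest), pvRank fh sf c ≠ 0 := by
        intro c hc
        have := List.find?_eq_none.mp hfd c hc
        simpa using this
      simp only
      by_cases hsf : sf = ""
      · subst hsf
        rw [if_neg (by simp), List.find?_eq_none.mpr]
        · simp
        · intro c _
          simpa using rank_ne_one_of_sf_empty fh c
      · rw [if_pos hsf, scan_eq_find1 fh sf hsf (c0 :: rest) h0]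
        cases (c0 :: rest).find? (fun c => pvRank fh sf c == 1) <;> simp

-- ===== VERDICT (by name: the statement is the Claim_ definition above) =====
theorem resolve_link_py_spec : Claim_equal_resolve_link_py := by
  intro stem folder_hint source_folder stem_to_keys _
  unfold Spec_resolve_link_py resolve_link_py resolve_link_py_alt
  generalize ((PySem.Dict.ofList stem_to_keys).get? stem).getD [] = cs
  by_cases hnil : cs = []
  · simp [hnil]
  · simp only [if_neg hnil]
    obtain ⟨c0, rest, rfl⟩ := List.exists_cons_of_ne_nil hnil
    have hc := resolve_core folder_hint source_folder c0 rest _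
      (hint_scan_eq_find0 folder_hint source_folder (c0 :: rest))
    rw [← hc]
    cases pvHintScan folder_hint (c0 :: rest) <;>
      cases (if source_folder ≠ "" then pvScan source_folder (c0 :: rest) else none) <;> rfl
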